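-- pv_equiv track=rewrite | github.com/rowannekabalan/advent-of-code-2024 | day2/main.py | check_almost_safe_differences
-- ===== SOURCE A (Python) =====
-- def check_sorted(report):
--     return sorted(report) == report or sorted(report, reverse=True) == report
--
-- def check_difference(report):
--     return all(0 < abs(report[i] - report[i+1]) <= 3 for i in range(len(report) - 1))
--
-- def is_strictly_safe(report):
--     return check_difference(report) and check_sorted(report)
--
-- def check_almost_safe_differences(report):
--     def offending_indices(report):
--         offences = []
--         for i in range(len(report)-1):
--             if not(0 < abs(report[i] - report[i+1]) <= 3):
--                 offences.append((i, i+1))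
--         return offences
--
--     offences = offending_indices(report)
--     if len(offences) == 1:
--         x, y = offences[0]
--         report_no_x = report.copy()
--         report_no_x.pop(x)
--         report_no_y = report.copy()
--         report_no_y.pop(y)
--         return is_strictly_safe(report_no_x) or is_strictly_safe(report_no_y)
--     return False
-- ===== SOURCE B (Python) =====
-- def check_almost_safe_differences(report):
--     # Single pass over the adjacent gaps classifying each as ascending (1..3),
--     # descending (-3..-1) or bad, keeping only counters and the bad gap's index;
--     # the two element-removals are then judged arithmetically from the counters
--     # and the merged gap, without ever building a candidate list.
--     m = len(report) - 1  # number of adjacent gaps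
--     pos = neg = 0
--     bad_i = -1
--     for k in range(m):
--         d = report[k + 1] - report[k]
--         if 1 <= d <= 3:
--             pos += 1
--         elif -3 <= d <= -1:
--             neg += 1
--         else:
--             bad_i = k
--     if pos + neg != m - 1:   # not exactly one bad gap
--         return False
--     i = bad_i
--     b = report[i + 1] - report[i]
--     # removing report[i]: drops gap i, merges it with gap i-1 (if any)
--     if i == 0:
--         ok = pos == m - 1 or neg == m - 1
--     else:
--         a = report[i] - report[i - 1]
--         s = a + b
--         ok = (1 <= s <= 3 and pos - (1 <= a <= 3) == m - 2) or \
--              (-3 <= s <= -1 and neg - (-3 <= a <= -1) == m - 2)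
--     if ok:
--         return True
--     # removing report[i + 1]: drops gap i, merges it with gap i+1 (if any)
--     if i == m - 1:
--         return pos == m - 1 or neg == m - 1
--     c = report[i + 2] - report[i + 1]
--     s = b + c
--     return (1 <= s <= 3 and pos - (1 <= c <= 3) == m - 2) or \
--            (-3 <= s <= -1 and neg - (-3 <= c <= -1) == m - 2)
-- ===== Notes on version B (the rewrite author's own statement) =====
-- stated objective: alternative
-- what changed: B replaces A's candidate-list machinery (copy/pop of two lists, a sorted()-comparison and a separate abs-difference pass per candidate) by a single classifying pass over the adjacent gaps that keeps only three counters and the bad gap's index, then decides both removals arithmetically from the counters and the merged gap, never materialising a candidate list.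
import Mathlib
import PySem

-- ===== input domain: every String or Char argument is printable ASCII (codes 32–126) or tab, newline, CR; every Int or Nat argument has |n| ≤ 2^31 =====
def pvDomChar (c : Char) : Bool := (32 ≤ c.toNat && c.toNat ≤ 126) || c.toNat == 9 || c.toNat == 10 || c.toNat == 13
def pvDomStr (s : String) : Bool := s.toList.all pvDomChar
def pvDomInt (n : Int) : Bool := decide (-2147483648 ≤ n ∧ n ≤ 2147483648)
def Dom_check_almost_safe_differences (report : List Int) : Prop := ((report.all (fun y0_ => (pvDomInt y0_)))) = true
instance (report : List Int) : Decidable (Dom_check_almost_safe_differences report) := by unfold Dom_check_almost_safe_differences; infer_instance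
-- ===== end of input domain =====

-- B replaces A's candidate-list rebuilding (copy/pop + sorted()-comparisons + abs pass) by one
-- classifying pass over the adjacent gaps whose counters decide both removals arithmetically
-- (objective: alternative). Return-value equivalence only.

-- ===== PORT A =====
def pyCheckSorted (report : List Int) : Bool :=
  (PySem.List.sorted report (fun x => x) false == report) ||
  (PySem.List.sorted report (fun x => x) true == report)

def pyCheckDifference (report : List Int) : Bool :=
  (PySem.List.pyRange 0 ((report.length : Int) - 1) 1).all
    (fun i => decide (0 < |PySem.List.pyGetD report i 0 - PySem.List.pyGetD report (i + 1) 0| ∧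
                      |PySem.List.pyGetD report i 0 - PySem.List.pyGetD report (i + 1) 0| ≤ 3))

def pyIsStrictlySafe (report : List Int) : Bool :=
  pyCheckDifference report && pyCheckSorted report

def pyOffendingIndices (report : List Int) : List (Int × Int) :=
  (PySem.List.pyRange 0 ((report.length : Int) - 1) 1).foldl
    (fun offences i =>
      if ¬ (0 < |PySem.List.pyGetD report i 0 - PySem.List.pyGetD report (i + 1) 0| ∧
            |PySem.List.pyGetD report i 0 - PySem.List.pyGetD report (i + 1) 0| ≤ 3)
      then offences ++ [(i, i + 1)] else offences) []

def check_almost_safe_differences (report : List Int) : Bool :=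
  let offences := pyOffendingIndices report
  if offences.length = 1 then
    match offences.head? with
    | some (x, y) =>
      -- report.copy(); .pop(x): the list after the pop; indices from offending_indices are
      -- always in range, so pop? is some; the none branches are unreachable
      match PySem.List.pop? report x, PySem.List.pop? report y with
      | some (_, report_no_x), some (_, report_no_y) =>
          pyIsStrictlySafe report_no_x || pyIsStrictlySafe report_no_y
      | _, _ => false
    | none => false
  else false

-- ===== PORT B =====
-- the loop body of Source B's single classifying pass (pos, neg, bad_i)
def altStep (report : List Int) (st : Int × Int × Int) (k : Int) : Int × Int × Int :=
  let d := PySem.List.pyGetD report (k + 1) 0 - PySem.List.pyGetD report k 0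
  if 1 ≤ d ∧ d ≤ 3 then (st.1 + 1, st.2.1, st.2.2)
  else if -3 ≤ d ∧ d ≤ -1 then (st.1, st.2.1 + 1, st.2.2)
  else (st.1, st.2.1, k)

def check_almost_safe_differences_alt (report : List Int) : Bool :=
  let m : Int := (report.length : Int) - 1
  let st := (PySem.List.pyRange 0 m 1).foldl (altStep report) (0, 0, -1)
  let pos := st.1
  let neg := st.2.1
  let i := st.2.2
  if pos + neg ≠ m - 1 then false   -- not exactly one bad gap
  else
    let b := PySem.List.pyGetD report (i + 1) 0 - PySem.List.pyGetD report i 0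
    let ok : Bool :=
      if i = 0 then decide (pos = m - 1 ∨ neg = m - 1)
      else
        let a := PySem.List.pyGetD report i 0 - PySem.List.pyGetD report (i - 1) 0
        let s := a + b
        decide ((1 ≤ s ∧ s ≤ 3 ∧ pos - (if 1 ≤ a ∧ a ≤ 3 then 1 else 0) = m - 2) ∨
                (-3 ≤ s ∧ s ≤ -1 ∧ neg - (if -3 ≤ a ∧ a ≤ -1 then 1 else 0) = m - 2))
    if ok then true
    else if i = m - 1 then decide (pos = m - 1 ∨ neg = m - 1)
    else
      let c := PySem.List.pyGetD report (i + 2) 0 - PySem.List.pyGetD report (i + 1) 0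
      let s := b + c
      decide ((1 ≤ s ∧ s ≤ 3 ∧ pos - (if 1 ≤ c ∧ c ≤ 3 then 1 else 0) = m - 2) ∨
              (-3 ≤ s ∧ s ≤ -1 ∧ neg - (if -3 ≤ c ∧ c ≤ -1 then 1 else 0) = m - 2))

-- ===== PRECONDITION & SPEC =====
def Spec_check_almost_safe_differences (report : List Int) (out : Bool) : Prop := out = check_almost_safe_differences_alt report
instance (report : List Int) (out : Bool) : Decidable (Spec_check_almost_safe_differences report out) := by unfold Spec_check_almost_safe_differences; infer_instance

-- ===== CLAIM (what is proved, stated in full; the proofs are below) =====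
def Claim_equal_check_almost_safe_differences : Prop := ∀ (report : List Int), Dom_check_almost_safe_differences report → Spec_check_almost_safe_differences report (check_almost_safe_differences report)

-- ===== LEMMAS AND PROOFS =====

-- the k-th adjacent gap of r, Int-indexed
def gd (r : List Int) (k : Int) : Int := PySem.List.pyGetD r (k + 1) 0 - PySem.List.pyGetD r k 0
def pB (r : List Int) (k : Int) : Bool := decide (1 ≤ gd r k ∧ gd r k ≤ 3)
def nB (r : List Int) (k : Int) : Bool := decide (-3 ≤ gd r k ∧ gd r k ≤ -1)
def bB (r : List Int) (k : Int) : Bool := !pB r k && !nB r k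

theorem all_adj_iff (r : List Int) (Q : Int → Int → Prop) [DecidableRel Q] :
    ((PySem.List.pyRange 0 ((r.length : Int) - 1) 1).all
      (fun i => decide (Q (PySem.List.pyGetD r i 0) (PySem.List.pyGetD r (i + 1) 0))) = true)
    ↔ ∀ (k : Nat), k + 1 < r.length → Q (r.getD k 0) (r.getD (k+1) 0) := by
  rw [List.all_eq_true]
  constructor
  · intro H k hk
    have hmem : (k : Int) ∈ PySem.List.pyRange 0 ((r.length : Int) - 1) 1 :=
      PySem.List.mem_pyRange_one.mpr (by omega)
    have := H _ hmem
    simp only [PySem.List.pyGetD_natCast, decide_eq_true_eq] at this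
    have h1 : ((k:Int) + 1) = ((k+1 : Nat) : Int) := by push_cast; ring
    rw [h1, PySem.List.pyGetD_natCast] at this
    exact this
  · intro H i hi
    obtain ⟨h0, h1⟩ := PySem.List.mem_pyRange_one.mp hi
    have hk : i = ((i.toNat : Nat) : Int) := by omega
    rw [hk]
    simp only [PySem.List.pyGetD_natCast, decide_eq_true_eq]
    have h2 : ((i.toNat:Int) + 1) = ((i.toNat+1 : Nat) : Int) := by push_cast; ring
    rw [h2, PySem.List.pyGetD_natCast]
    exact H i.toNat (by omega)

theorem sorted_id_eq_self_iff (r : List Int) :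
    (PySem.List.sorted r (fun x => x) false = r) ↔ r.Pairwise (fun a b => a ≤ b) := by
  constructor
  · intro h
    have := PySem.List.sorted_pairwise r (fun x : Int => x)
    rwa [h] at this
  · intro h
    exact PySem.List.sorted_eq_self_of_pairwise r (fun x : Int => x) h

theorem sorted_rev_eq_self_iff (r : List Int) :
    (PySem.List.sorted r (fun x => x) true = r) ↔ r.Pairwise (fun a b => b ≤ a) := by
  constructor
  · intro h
    have := PySem.List.sorted_pairwise_rev r (fun x : Int => x)
    rwa [h] at this
  · intro h
    exact PySem.List.sorted_rev_eq_self_of_pairwise r (fun x : Int => x) h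

theorem pairwise_iff_adj (r : List Int) :
    r.Pairwise (fun a b : Int => a ≤ b) ↔ ∀ (k : Nat), k + 1 < r.length → r.getD k 0 ≤ r.getD (k+1) 0 := by
  rw [show (fun a b : Int => a ≤ b) = (· ≤ ·) from rfl, ← List.isChain_iff_pairwise,
    List.isChain_iff_getElem]
  constructor
  · intro H k hk
    have e1 : r.getD k 0 = r[k] := List.getD_eq_getElem r 0 (by omega)
    have e2 : r.getD (k+1) 0 = r[k+1] := List.getD_eq_getElem r 0 hk
    rw [e1, e2]
    exact H k hk
  · intro H k hk
    have e1 : r.getD k 0 = r[k] := List.getD_eq_getElem r 0 (by omega)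
    have e2 : r.getD (k+1) 0 = r[k+1] := List.getD_eq_getElem r 0 hk
    have := H k hk
    rwa [e1, e2] at this

theorem pairwise_ge_iff_adj (r : List Int) :
    r.Pairwise (fun a b : Int => b ≤ a) ↔ ∀ (k : Nat), k + 1 < r.length → r.getD (k+1) 0 ≤ r.getD k 0 := by
  rw [show (fun a b : Int => b ≤ a) = (· ≥ ·) from rfl, ← List.isChain_iff_pairwise,
    List.isChain_iff_getElem]
  constructor
  · intro H k hk
    have e1 : r.getD k 0 = r[k] := List.getD_eq_getElem r 0 (by omega)
    have e2 : r.getD (k+1) 0 = r[k+1] := List.getD_eq_getElem r 0 hk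
    rw [e1, e2]
    exact H k hk
  · intro H k hk
    have e1 : r.getD k 0 = r[k] := List.getD_eq_getElem r 0 (by omega)
    have e2 : r.getD (k+1) 0 = r[k+1] := List.getD_eq_getElem r 0 hk
    have := H k hk
    rwa [e1, e2] at this

-- strict safety (difference pass + sortedness) ↔ all gaps in [1,3] or all in [-3,-1]
theorem strict_iff (r : List Int) :
    pyIsStrictlySafe r = true ↔
      ((∀ k : Nat, k + 1 < r.length → 1 ≤ r.getD (k+1) 0 - r.getD k 0 ∧ r.getD (k+1) 0 - r.getD k 0 ≤ 3) ∨
       (∀ k : Nat, k + 1 < r.length → -3 ≤ r.getD (k+1) 0 - r.getD k 0 ∧ r.getD (k+1) 0 - r.getD k 0 ≤ -1)) := by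
  have hDiff : pyCheckDifference r = true ↔
      ∀ k : Nat, k + 1 < r.length →
        0 < |r.getD k 0 - r.getD (k+1) 0| ∧ |r.getD k 0 - r.getD (k+1) 0| ≤ 3 := by
    unfold pyCheckDifference
    exact all_adj_iff r (fun a b => 0 < |a - b| ∧ |a - b| ≤ 3)
  have hSort : pyCheckSorted r = true ↔
      ((∀ k : Nat, k + 1 < r.length → r.getD k 0 ≤ r.getD (k+1) 0) ∨
       (∀ k : Nat, k + 1 < r.length → r.getD (k+1) 0 ≤ r.getD k 0)) := by
    unfold pyCheckSorted
    rw [Bool.or_eq_true, beq_iff_eq, beq_iff_eq, sorted_id_eq_self_iff, sorted_rev_eq_self_iff,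
      pairwise_iff_adj, pairwise_ge_iff_adj]
  unfold pyIsStrictlySafe
  rw [Bool.and_eq_true, hDiff, hSort]
  constructor
  · rintro ⟨hd, hs | hs⟩
    · left; intro k hk
      have h3 := hd k hk; have h4 := hs k hk
      rcases abs_cases (r.getD k 0 - r.getD (k+1) 0) with ⟨he, _⟩ | ⟨he, _⟩ <;> omega
    · right; intro k hk
      have h3 := hd k hk; have h4 := hs k hk
      rcases abs_cases (r.getD k 0 - r.getD (k+1) 0) with ⟨he, _⟩ | ⟨he, _⟩ <;> omega
  · rintro (h | h)
    · refine ⟨fun k hk => ?_, Or.inl (fun k hk => by have := h k hk; omega)⟩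
      have h3 := h k hk
      rcases abs_cases (r.getD k 0 - r.getD (k+1) 0) with ⟨he, _⟩ | ⟨he, _⟩ <;> omega
    · refine ⟨fun k hk => ?_, Or.inr (fun k hk => by have := h k hk; omega)⟩
      have h3 := h k hk
      rcases abs_cases (r.getD k 0 - r.getD (k+1) 0) with ⟨he, _⟩ | ⟨he, _⟩ <;> omega


-- ---- single-pass fold characterisation ----

theorem altStep_p (r : List Int) (s : Int × Int × Int) (k : Int) (h : pB r k = true) :
    altStep r s k = (s.1 + 1, s.2.1, s.2.2) := by
  unfold pB gd at h
  rw [decide_eq_true_eq] at h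
  simp only [altStep]
  rw [if_pos h]

theorem altStep_n (r : List Int) (s : Int × Int × Int) (k : Int) (h : nB r k = true) :
    altStep r s k = (s.1, s.2.1 + 1, s.2.2) := by
  unfold nB gd at h
  rw [decide_eq_true_eq] at h
  simp only [altStep]
  rw [if_neg (by omega), if_pos h]

theorem altStep_b (r : List Int) (s : Int × Int × Int) (k : Int)
    (hp : pB r k = false) (hn : nB r k = false) :
    altStep r s k = (s.1, s.2.1, k) := by
  unfold pB gd at hp
  unfold nB gd at hn
  rw [decide_eq_false_iff_not] at hp hn
  simp only [altStep]
  rw [if_neg hp, if_neg hn]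

theorem fold_fst (r : List Int) (l : List Int) (s : Int × Int × Int) :
    (l.foldl (altStep r) s).1 = s.1 + (l.countP (pB r) : Int) := by
  induction l generalizing s with
  | nil => simp
  | cons x t ih =>
    rw [List.foldl_cons, List.countP_cons]
    by_cases hp : pB r x = true
    · rw [altStep_p r s x hp, ih, hp]
      simp
      omega
    · rw [Bool.not_eq_true] at hp
      rw [hp]
      by_cases hn : nB r x = true
      · rw [altStep_n r s x hn, ih]
        simp
      · rw [Bool.not_eq_true] at hn
        rw [altStep_b r s x hp hn, ih]
        simp

theorem fold_snd (r : List Int) (l : List Int) (s : Int × Int × Int) :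
    (l.foldl (altStep r) s).2.1 = s.2.1 + (l.countP (nB r) : Int) := by
  induction l generalizing s with
  | nil => simp
  | cons x t ih =>
    rw [List.foldl_cons, List.countP_cons]
    by_cases hp : pB r x = true
    · have hn : nB r x = false := by
        unfold pB gd at hp
        unfold nB gd
        rw [decide_eq_true_eq] at hp
        rw [decide_eq_false_iff_not]
        omega
      rw [altStep_p r s x hp, ih, hn]
      simp
    · rw [Bool.not_eq_true] at hp
      by_cases hn : nB r x = true
      · rw [altStep_n r s x hn, ih, hn]
        simp
        omega
      · rw [Bool.not_eq_true] at hn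
        rw [altStep_b r s x hp hn, ih, hn]
        simp

theorem fold_fst0 (r : List Int) (l : List Int) :
    (l.foldl (altStep r) ((0:Int),(0:Int),(-1:Int))).1 = (l.countP (pB r) : Int) := by
  rw [fold_fst]
  simp

theorem fold_snd0 (r : List Int) (l : List Int) :
    (l.foldl (altStep r) ((0:Int),(0:Int),(-1:Int))).2.1 = (l.countP (nB r) : Int) := by
  rw [fold_snd]
  simp

theorem fold_thd_clean (r : List Int) (l : List Int) (s : Int × Int × Int)
    (h : ∀ k ∈ l, bB r k = false) :
    (l.foldl (altStep r) s).2.2 = s.2.2 := by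
  induction l generalizing s with
  | nil => simp
  | cons x t ih =>
    rw [List.foldl_cons, ih _ (fun k hk => h k (List.mem_cons_of_mem _ hk))]
    have hx := h x List.mem_cons_self
    unfold bB at hx
    by_cases hp : pB r x = true
    · rw [altStep_p r s x hp]
    · rw [Bool.not_eq_true] at hp
      by_cases hn : nB r x = true
      · rw [altStep_n r s x hn]
      · rw [Bool.not_eq_true] at hn
        rw [hp, hn] at hx
        simp at hx

theorem fold_thd (r : List Int) (l1 l2 : List Int) (s : Int × Int × Int) (i : Int)
    (hbad : bB r i = true) (hclean : ∀ k ∈ l2, bB r k = false) :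
    ((l1 ++ i :: l2).foldl (altStep r) s).2.2 = i := by
  unfold bB at hbad
  rw [Bool.and_eq_true, Bool.not_eq_true', Bool.not_eq_true'] at hbad
  rw [List.foldl_append, List.foldl_cons, altStep_b _ _ _ hbad.1 hbad.2,
    fold_thd_clean r l2 _ hclean]

-- each gap is exactly one of: ascending, descending, bad
theorem tripart (r : List Int) (l : List Int) :
    l.countP (pB r) + l.countP (nB r) + l.countP (bB r) = l.length := by
  induction l with
  | nil => simp
  | cons x t ih =>
    simp only [List.countP_cons, List.length_cons]
    by_cases hp : pB r x = true
    · have hn : nB r x = false := by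
        unfold pB gd at hp
        unfold nB gd
        rw [decide_eq_true_eq] at hp
        rw [decide_eq_false_iff_not]
        omega
      have hb : bB r x = false := by unfold bB; rw [hp]; rfl
      rw [hp, hn, hb]
      simp
      omega
    · rw [Bool.not_eq_true] at hp
      by_cases hn : nB r x = true
      · have hb : bB r x = false := by unfold bB; rw [hp, hn]; rfl
        rw [hp, hn, hb]
        simp
        omega
      · rw [Bool.not_eq_true] at hn
        have hb : bB r x = true := by unfold bB; rw [hp, hn]; rfl
        rw [hp, hn, hb]
        simp
        omega

-- ---- counting lemmas: counts over the full range vs pointwise, with excluded indices ----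

theorem countP_one_gap (m u : Int) (q : Int → Bool) (h0 : 0 ≤ u) (h1 : u < m) :
    (((PySem.List.pyRange 0 m 1).countP q : Int) = m - 1 + (if q u then 1 else 0)) ↔
      ∀ k : Int, 0 ≤ k → k < m → k ≠ u → q k = true := by
  have h2 : PySem.List.pyRange u m 1 = u :: PySem.List.pyRange (u+1) m 1 :=
    PySem.List.pyRange_one_cons h1
  have hsplit : PySem.List.pyRange 0 m 1
      = PySem.List.pyRange 0 u 1 ++ (u :: PySem.List.pyRange (u+1) m 1) := by
    rw [PySem.List.pyRange_one_append 0 u m h0 (le_of_lt h1), h2]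
  have hl1 : (PySem.List.pyRange 0 u 1).length = u.toNat := by
    rw [PySem.List.length_pyRange_one]; omega
  have hl2 : (PySem.List.pyRange (u+1) m 1).length = (m - u - 1).toNat := by
    rw [PySem.List.length_pyRange_one]; omega
  have hc1 := List.countP_le_length (p := q) (l := PySem.List.pyRange 0 u 1)
  have hc2 := List.countP_le_length (p := q) (l := PySem.List.pyRange (u+1) m 1)
  rw [hl1] at hc1
  rw [hl2] at hc2
  rw [hsplit, List.countP_append, List.countP_cons]
  cases hqu : q u with
  | true =>
    simp
    constructor
    · intro H k hk0 hk1 hku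
      have e1 : (PySem.List.pyRange 0 u 1).countP q = (PySem.List.pyRange 0 u 1).length := by
        rw [hl1]; omega
      have e2 : (PySem.List.pyRange (u+1) m 1).countP q = (PySem.List.pyRange (u+1) m 1).length := by
        rw [hl2]; omega
      rcases lt_or_gt_of_ne hku with h | h
      · exact List.countP_eq_length.mp e1 k (PySem.List.mem_pyRange_one.mpr (by omega))
      · exact List.countP_eq_length.mp e2 k (PySem.List.mem_pyRange_one.mpr (by omega))
    · intro H
      have e1 : (PySem.List.pyRange 0 u 1).countP q = (PySem.List.pyRange 0 u 1).length :=
        List.countP_eq_length.mpr (fun k hk => by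
          obtain ⟨a, b⟩ := PySem.List.mem_pyRange_one.mp hk
          exact H k a (by omega) (by omega))
      have e2 : (PySem.List.pyRange (u+1) m 1).countP q = (PySem.List.pyRange (u+1) m 1).length :=
        List.countP_eq_length.mpr (fun k hk => by
          obtain ⟨a, b⟩ := PySem.List.mem_pyRange_one.mp hk
          exact H k (by omega) b (by omega))
      rw [e1, e2, hl1, hl2]
      omega
  | false =>
    simp
    constructor
    · intro H k hk0 hk1 hku
      have e1 : (PySem.List.pyRange 0 u 1).countP q = (PySem.List.pyRange 0 u 1).length := by
        rw [hl1]; omega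
      have e2 : (PySem.List.pyRange (u+1) m 1).countP q = (PySem.List.pyRange (u+1) m 1).length := by
        rw [hl2]; omega
      rcases lt_or_gt_of_ne hku with h | h
      · exact List.countP_eq_length.mp e1 k (PySem.List.mem_pyRange_one.mpr (by omega))
      · exact List.countP_eq_length.mp e2 k (PySem.List.mem_pyRange_one.mpr (by omega))
    · intro H
      have e1 : (PySem.List.pyRange 0 u 1).countP q = (PySem.List.pyRange 0 u 1).length :=
        List.countP_eq_length.mpr (fun k hk => by
          obtain ⟨a, b⟩ := PySem.List.mem_pyRange_one.mp hk
          exact H k a (by omega) (by omega))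
      have e2 : (PySem.List.pyRange (u+1) m 1).countP q = (PySem.List.pyRange (u+1) m 1).length :=
        List.countP_eq_length.mpr (fun k hk => by
          obtain ⟨a, b⟩ := PySem.List.mem_pyRange_one.mp hk
          exact H k (by omega) b (by omega))
      rw [e1, e2, hl1, hl2]
      omega

theorem countP_two_gap (m u : Int) (q : Int → Bool) (h0 : 0 ≤ u) (h1 : u + 1 < m) :
    (((PySem.List.pyRange 0 m 1).countP q : Int)
        = m - 2 + (if q u then 1 else 0) + (if q (u+1) then 1 else 0)) ↔
      ∀ k : Int, 0 ≤ k → k < m → k ≠ u → k ≠ u + 1 → q k = true := by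
  have h2 : PySem.List.pyRange u m 1 = u :: (u+1) :: PySem.List.pyRange (u+2) m 1 := by
    rw [PySem.List.pyRange_one_cons (by omega : u < m)]
    rw [PySem.List.pyRange_one_cons (by omega : u + 1 < m)]
    rw [show u + 1 + 1 = u + 2 by ring]
  have hsplit : PySem.List.pyRange 0 m 1
      = PySem.List.pyRange 0 u 1 ++ (u :: (u+1) :: PySem.List.pyRange (u+2) m 1) := by
    rw [PySem.List.pyRange_one_append 0 u m h0 (by omega), h2]
  have hl1 : (PySem.List.pyRange 0 u 1).length = u.toNat := by
    rw [PySem.List.length_pyRange_one]; omega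
  have hl2 : (PySem.List.pyRange (u+2) m 1).length = (m - u - 2).toNat := by
    rw [PySem.List.length_pyRange_one]; omega
  have hc1 := List.countP_le_length (p := q) (l := PySem.List.pyRange 0 u 1)
  have hc2 := List.countP_le_length (p := q) (l := PySem.List.pyRange (u+2) m 1)
  rw [hl1] at hc1
  rw [hl2] at hc2
  rw [hsplit, List.countP_append, List.countP_cons, List.countP_cons]
  have main : ∀ (cu cv : Nat),
      ((q u = true → cu = 1) ∧ (q u = false → cu = 0)) →
      ((q (u+1) = true → cv = 1) ∧ (q (u+1) = false → cv = 0)) →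
      ((((PySem.List.pyRange 0 u 1).countP q +
          ((PySem.List.pyRange (u+2) m 1).countP q + cv + cu) : Nat) : Int)
          = m - 2 + ((if q u then 1 else 0) : Int) + ((if q (u+1) then 1 else 0) : Int) ↔
        ∀ k : Int, 0 ≤ k → k < m → k ≠ u → k ≠ u + 1 → q k = true) := by
    intro cu cv hcu hcv
    cases hqu : q u with
    | true => cases hqv : q (u+1) with
      | true =>
        simp
        have e3 : cu = 1 := hcu.1 hqu
        have e4 : cv = 1 := hcv.1 hqv
        subst e3; subst e4
        constructor
        · intro H k hk0 hk1 hku hkv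
          have e1 : (PySem.List.pyRange 0 u 1).countP q = (PySem.List.pyRange 0 u 1).length := by
            rw [hl1]; omega
          have e2 : (PySem.List.pyRange (u+2) m 1).countP q = (PySem.List.pyRange (u+2) m 1).length := by
            rw [hl2]; omega
          rcases lt_trichotomy k u with h | h | h
          · exact List.countP_eq_length.mp e1 k (PySem.List.mem_pyRange_one.mpr (by omega))
          · omega
          · exact List.countP_eq_length.mp e2 k (PySem.List.mem_pyRange_one.mpr (by omega))
        · intro H
          have e1 : (PySem.List.pyRange 0 u 1).countP q = (PySem.List.pyRange 0 u 1).length :=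
            List.countP_eq_length.mpr (fun k hk => by
              obtain ⟨a, b⟩ := PySem.List.mem_pyRange_one.mp hk
              exact H k a (by omega) (by omega) (by omega))
          have e2 : (PySem.List.pyRange (u+2) m 1).countP q = (PySem.List.pyRange (u+2) m 1).length :=
            List.countP_eq_length.mpr (fun k hk => by
              obtain ⟨a, b⟩ := PySem.List.mem_pyRange_one.mp hk
              exact H k (by omega) b (by omega) (by omega))
          rw [e1, e2, hl1, hl2]
          omega
      | false =>
        simp
        have e3 : cu = 1 := hcu.1 hqu
        have e4 : cv = 0 := hcv.2 hqv
        subst e3; subst e4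
        constructor
        · intro H k hk0 hk1 hku hkv
          have e1 : (PySem.List.pyRange 0 u 1).countP q = (PySem.List.pyRange 0 u 1).length := by
            rw [hl1]; omega
          have e2 : (PySem.List.pyRange (u+2) m 1).countP q = (PySem.List.pyRange (u+2) m 1).length := by
            rw [hl2]; omega
          rcases lt_trichotomy k u with h | h | h
          · exact List.countP_eq_length.mp e1 k (PySem.List.mem_pyRange_one.mpr (by omega))
          · omega
          · exact List.countP_eq_length.mp e2 k (PySem.List.mem_pyRange_one.mpr (by omega))
        · intro H
          have e1 : (PySem.List.pyRange 0 u 1).countP q = (PySem.List.pyRange 0 u 1).length :=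
            List.countP_eq_length.mpr (fun k hk => by
              obtain ⟨a, b⟩ := PySem.List.mem_pyRange_one.mp hk
              exact H k a (by omega) (by omega) (by omega))
          have e2 : (PySem.List.pyRange (u+2) m 1).countP q = (PySem.List.pyRange (u+2) m 1).length :=
            List.countP_eq_length.mpr (fun k hk => by
              obtain ⟨a, b⟩ := PySem.List.mem_pyRange_one.mp hk
              exact H k (by omega) b (by omega) (by omega))
          rw [e1, e2, hl1, hl2]
          omega
    | false => cases hqv : q (u+1) with
      | true =>
        simp
        have e3 : cu = 0 := hcu.2 hqu
        have e4 : cv = 1 := hcv.1 hqv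
        subst e3; subst e4
        constructor
        · intro H k hk0 hk1 hku hkv
          have e1 : (PySem.List.pyRange 0 u 1).countP q = (PySem.List.pyRange 0 u 1).length := by
            rw [hl1]; omega
          have e2 : (PySem.List.pyRange (u+2) m 1).countP q = (PySem.List.pyRange (u+2) m 1).length := by
            rw [hl2]; omega
          rcases lt_trichotomy k u with h | h | h
          · exact List.countP_eq_length.mp e1 k (PySem.List.mem_pyRange_one.mpr (by omega))
          · omega
          · exact List.countP_eq_length.mp e2 k (PySem.List.mem_pyRange_one.mpr (by omega))
        · intro H
          have e1 : (PySem.List.pyRange 0 u 1).countP q = (PySem.List.pyRange 0 u 1).length :=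
            List.countP_eq_length.mpr (fun k hk => by
              obtain ⟨a, b⟩ := PySem.List.mem_pyRange_one.mp hk
              exact H k a (by omega) (by omega) (by omega))
          have e2 : (PySem.List.pyRange (u+2) m 1).countP q = (PySem.List.pyRange (u+2) m 1).length :=
            List.countP_eq_length.mpr (fun k hk => by
              obtain ⟨a, b⟩ := PySem.List.mem_pyRange_one.mp hk
              exact H k (by omega) b (by omega) (by omega))
          rw [e1, e2, hl1, hl2]
          omega
      | false =>
        simp
        have e3 : cu = 0 := hcu.2 hqu
        have e4 : cv = 0 := hcv.2 hqv
        subst e3; subst e4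
        constructor
        · intro H k hk0 hk1 hku hkv
          have e1 : (PySem.List.pyRange 0 u 1).countP q = (PySem.List.pyRange 0 u 1).length := by
            rw [hl1]; omega
          have e2 : (PySem.List.pyRange (u+2) m 1).countP q = (PySem.List.pyRange (u+2) m 1).length := by
            rw [hl2]; omega
          rcases lt_trichotomy k u with h | h | h
          · exact List.countP_eq_length.mp e1 k (PySem.List.mem_pyRange_one.mpr (by omega))
          · omega
          · exact List.countP_eq_length.mp e2 k (PySem.List.mem_pyRange_one.mpr (by omega))
        · intro H
          have e1 : (PySem.List.pyRange 0 u 1).countP q = (PySem.List.pyRange 0 u 1).length :=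
            List.countP_eq_length.mpr (fun k hk => by
              obtain ⟨a, b⟩ := PySem.List.mem_pyRange_one.mp hk
              exact H k a (by omega) (by omega) (by omega))
          have e2 : (PySem.List.pyRange (u+2) m 1).countP q = (PySem.List.pyRange (u+2) m 1).length :=
            List.countP_eq_length.mpr (fun k hk => by
              obtain ⟨a, b⟩ := PySem.List.mem_pyRange_one.mp hk
              exact H k (by omega) b (by omega) (by omega))
          rw [e1, e2, hl1, hl2]
          omega
  exact main (if q u then 1 else 0) (if q (u+1) then 1 else 0)
    ⟨fun h => by rw [h]; rfl, fun h => by rw [h]; rfl⟩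
    ⟨fun h => by rw [h]; rfl, fun h => by rw [h]; rfl⟩


-- ---- gaps of a list with one element removed, in terms of the original gaps ----

theorem getD_eraseIdx (r : List Int) (t k : Nat) (ht : t < r.length) (hk : k < r.length - 1) :
    (r.eraseIdx t).getD k 0 = if k < t then r.getD k 0 else r.getD (k+1) 0 := by
  have hlen : (r.eraseIdx t).length = r.length - 1 := by
    rw [List.length_eraseIdx]; simp [ht]
  have hk' : k < (r.eraseIdx t).length := by omega
  rw [List.getD_eq_getElem _ 0 hk', List.getElem_eraseIdx]
  split_ifs with h
  · rw [List.getD_eq_getElem r 0 (by omega)]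
  · rw [List.getD_eq_getElem r 0 (by omega)]

theorem erase_iff (P : Int → Prop) (r : List Int) (j : Int) (h0 : 0 ≤ j) (h1 : j < (r.length : Int)) :
    (∀ k : Nat, k + 1 < (r.eraseIdx j.toNat).length →
        P ((r.eraseIdx j.toNat).getD (k+1) 0 - (r.eraseIdx j.toNat).getD k 0)) ↔
      ((∀ k : Int, 0 ≤ k → k < (r.length : Int) - 1 → k ≠ j - 1 → k ≠ j → P (gd r k)) ∧
       (1 ≤ j → j + 1 < (r.length : Int) → P (PySem.List.pyGetD r (j+1) 0 - PySem.List.pyGetD r (j-1) 0))) := by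
  have ht : j.toNat < r.length := by omega
  have hlen : (r.eraseIdx j.toNat).length = r.length - 1 := by
    rw [List.length_eraseIdx]; simp [ht]
  have hgd : ∀ k : Int, 0 ≤ k → gd r k = r.getD (k.toNat+1) 0 - r.getD k.toNat 0 := by
    intro k hk
    unfold gd
    have e1 : PySem.List.pyGetD r (k+1) 0 = r.getD (k.toNat+1) 0 := by
      rw [show k + 1 = ((k.toNat + 1 : Nat) : Int) by omega, PySem.List.pyGetD_natCast]
    have e2 : PySem.List.pyGetD r k 0 = r.getD k.toNat 0 := by
      conv_lhs => rw [show k = ((k.toNat : Nat) : Int) by omega]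
      rw [PySem.List.pyGetD_natCast]
    rw [e1, e2]
  constructor
  · intro H
    constructor
    · intro k hk0 hk1 hkj1 hkj
      by_cases hlt : k < j
      · have h' := H k.toNat (by omega)
        rw [getD_eraseIdx r j.toNat (k.toNat+1) ht (by omega),
          getD_eraseIdx r j.toNat k.toNat ht (by omega)] at h'
        rw [if_pos (by omega), if_pos (by omega)] at h'
        rw [hgd k hk0]
        exact h'
      · have h' := H (k.toNat - 1) (by omega)
        rw [getD_eraseIdx r j.toNat (k.toNat - 1 + 1) ht (by omega),
          getD_eraseIdx r j.toNat (k.toNat - 1) ht (by omega)] at h'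
        rw [if_neg (by omega), if_neg (by omega)] at h'
        rw [hgd k hk0]
        rw [show k.toNat - 1 + 1 = k.toNat by omega] at h'
        exact h'
    · intro hj1 hj2
      have h' := H (j.toNat - 1) (by omega)
      rw [getD_eraseIdx r j.toNat (j.toNat - 1 + 1) ht (by omega),
        getD_eraseIdx r j.toNat (j.toNat - 1) ht (by omega)] at h'
      rw [if_neg (by omega), if_pos (by omega)] at h'
      have e1 : PySem.List.pyGetD r (j+1) 0 = r.getD (j.toNat - 1 + 1 + 1) 0 := by
        rw [show j + 1 = ((j.toNat - 1 + 1 + 1 : Nat) : Int) by omega, PySem.List.pyGetD_natCast]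
      have e2 : PySem.List.pyGetD r (j-1) 0 = r.getD (j.toNat - 1) 0 := by
        rw [show j - 1 = ((j.toNat - 1 : Nat) : Int) by omega, PySem.List.pyGetD_natCast]
      rw [e1, e2]
      exact h'
  · rintro ⟨Hout, Hm⟩ k hk
    rw [hlen] at hk
    rw [getD_eraseIdx r j.toNat (k+1) ht (by omega), getD_eraseIdx r j.toNat k ht (by omega)]
    by_cases hc1 : k + 1 < j.toNat
    · rw [if_pos (by omega), if_pos (by omega)]
      have h' := Hout (k : Int) (by omega) (by omega) (by omega) (by omega)
      rw [hgd _ (by omega)] at h'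
      rw [show ((k : Int)).toNat = k by omega] at h'
      exact h'
    · by_cases hc2 : k + 1 = j.toNat
      · rw [if_neg (by omega : ¬ (k + 1 < j.toNat)), if_pos (by omega : k < j.toNat)]
        have h' := Hm (by omega) (by omega)
        have e1 : PySem.List.pyGetD r (j+1) 0 = r.getD (k+1+1) 0 := by
          rw [show j + 1 = ((k+1+1 : Nat) : Int) by omega, PySem.List.pyGetD_natCast]
        have e2 : PySem.List.pyGetD r (j-1) 0 = r.getD k 0 := by
          rw [show j - 1 = ((k : Nat) : Int) by omega, PySem.List.pyGetD_natCast]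
        rw [e1, e2] at h'
        exact h'
      · rw [if_neg (by omega), if_neg (by omega)]
        have h' := Hout ((k:Int)+1) (by omega) (by omega) (by omega) (by omega)
        rw [hgd _ (by omega)] at h'
        rw [show ((k:Int)+1).toNat = k + 1 by omega] at h'
        exact h'

theorem erase_iff_up (r : List Int) (j : Int) (h0 : 0 ≤ j) (h1 : j < (r.length : Int)) :
    (∀ k : Nat, k + 1 < (r.eraseIdx j.toNat).length →
        1 ≤ (r.eraseIdx j.toNat).getD (k+1) 0 - (r.eraseIdx j.toNat).getD k 0 ∧
        (r.eraseIdx j.toNat).getD (k+1) 0 - (r.eraseIdx j.toNat).getD k 0 ≤ 3) ↔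
      ((∀ k : Int, 0 ≤ k → k < (r.length : Int) - 1 → k ≠ j - 1 → k ≠ j →
          (1 ≤ gd r k ∧ gd r k ≤ 3)) ∧
       (1 ≤ j → j + 1 < (r.length : Int) →
          (1 ≤ PySem.List.pyGetD r (j+1) 0 - PySem.List.pyGetD r (j-1) 0 ∧
           PySem.List.pyGetD r (j+1) 0 - PySem.List.pyGetD r (j-1) 0 ≤ 3))) :=
  erase_iff (fun d => 1 ≤ d ∧ d ≤ 3) r j h0 h1

theorem erase_iff_down (r : List Int) (j : Int) (h0 : 0 ≤ j) (h1 : j < (r.length : Int)) :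
    (∀ k : Nat, k + 1 < (r.eraseIdx j.toNat).length →
        -3 ≤ (r.eraseIdx j.toNat).getD (k+1) 0 - (r.eraseIdx j.toNat).getD k 0 ∧
        (r.eraseIdx j.toNat).getD (k+1) 0 - (r.eraseIdx j.toNat).getD k 0 ≤ -1) ↔
      ((∀ k : Int, 0 ≤ k → k < (r.length : Int) - 1 → k ≠ j - 1 → k ≠ j →
          (-3 ≤ gd r k ∧ gd r k ≤ -1)) ∧
       (1 ≤ j → j + 1 < (r.length : Int) →
          (-3 ≤ PySem.List.pyGetD r (j+1) 0 - PySem.List.pyGetD r (j-1) 0 ∧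
           PySem.List.pyGetD r (j+1) 0 - PySem.List.pyGetD r (j-1) 0 ≤ -1))) :=
  erase_iff (fun d => -3 ≤ d ∧ d ≤ -1) r j h0 h1

-- ---- A's offence list is the filtered range of bad gaps ----

def badL (r : List Int) : List Int :=
  (PySem.List.pyRange 0 ((r.length : Int) - 1) 1).filter (bB r)

theorem offA (r : List Int) : pyOffendingIndices r = (badL r).map (fun i => (i, i + 1)) := by
  unfold pyOffendingIndices badL
  rw [PySem.List.foldl_append_ite
    (p := fun i => ¬ (0 < |PySem.List.pyGetD r i 0 - PySem.List.pyGetD r (i + 1) 0| ∧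
                      |PySem.List.pyGetD r i 0 - PySem.List.pyGetD r (i + 1) 0| ≤ 3))
    (f := fun i => (i, i + 1))]
  rw [List.nil_append]
  congr 1
  apply List.filter_congr
  intro k _
  unfold bB pB nB gd
  rw [Bool.eq_iff_iff]
  simp only [decide_eq_true_eq, Bool.and_eq_true, Bool.not_eq_true', decide_eq_false_iff_not]
  rcases abs_cases (PySem.List.pyGetD r k 0 - PySem.List.pyGetD r (k + 1) 0) with ⟨he, hs⟩ | ⟨he, hs⟩ <;>
    rw [he] <;> omega



theorem if_true_else (a b : Bool) : (if a then true else b) = (a || b) := by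
  cases a <;> simp

theorem main_eq (r : List Int) :
    check_almost_safe_differences r = check_almost_safe_differences_alt r := by
  unfold check_almost_safe_differences check_almost_safe_differences_alt
  rw [offA r]
  have hlenR : (PySem.List.pyRange 0 ((r.length : Int) - 1) 1).length
      = ((r.length : Int) - 1).toNat := by
    rw [PySem.List.length_pyRange_one]
    congr 1
    omega
  have htri := tripart r (PySem.List.pyRange 0 ((r.length : Int) - 1) 1)
  cases hL : badL r with
  | nil =>
    have hcb : (PySem.List.pyRange 0 ((r.length : Int) - 1) 1).countP (bB r) = 0 := by
      rw [List.countP_eq_length_filter]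
      unfold badL at hL
      rw [hL]
      rfl
    simp only [List.map_nil, List.length_nil]
    rw [if_neg (by decide : ¬ (0 = 1)), fold_fst0, fold_snd0]
    rw [if_pos (by omega : ¬ ((↑((PySem.List.pyRange 0 ((r.length : Int) - 1) 1).countP (pB r)) : Int) + ↑((PySem.List.pyRange 0 ((r.length : Int) - 1) 1).countP (nB r)) = (r.length : Int) - 1 - 1))]
  | cons i0 tl =>
    cases tl with
    | cons j1 tl2 =>
      have hcb : (PySem.List.pyRange 0 ((r.length : Int) - 1) 1).countP (bB r)
          = (badL r).length := by
        rw [List.countP_eq_length_filter]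
        unfold badL
        rfl
      rw [hL] at hcb
      simp only [List.map_cons, List.length_cons]
      rw [if_neg (by simp), fold_fst0, fold_snd0]
      rw [if_pos (by
        simp only [List.length_cons] at hcb
        omega)]
    | nil =>
      -- exactly one bad gap, at index i0
      have hcb : (PySem.List.pyRange 0 ((r.length : Int) - 1) 1).countP (bB r) = 1 := by
        rw [List.countP_eq_length_filter]
        unfold badL at hL
        rw [hL]
        rfl
      have hfil : (PySem.List.pyRange 0 ((r.length : Int) - 1) 1).filter (bB r) = [i0] := by
        unfold badL at hL
        exact hL
      have hmemF : i0 ∈ (PySem.List.pyRange 0 ((r.length : Int) - 1) 1).filter (bB r) := by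
        rw [hfil]
        exact List.mem_cons_self
      have hi0R := (List.mem_filter.mp hmemF).1
      have hbad0 := (List.mem_filter.mp hmemF).2
      obtain ⟨hi00, hi0m⟩ := PySem.List.mem_pyRange_one.mp hi0R
      have huniq : ∀ k : Int, 0 ≤ k → k < (r.length : Int) - 1 → bB r k = true → k = i0 := by
        intro k a b hbk
        have hkF : k ∈ (PySem.List.pyRange 0 ((r.length : Int) - 1) 1).filter (bB r) :=
          List.mem_filter.mpr ⟨PySem.List.mem_pyRange_one.mpr ⟨a, b⟩, hbk⟩
        rw [hfil] at hkF
        simpa using hkF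
      have hm1 : (1 : Int) ≤ (r.length : Int) - 1 := by omega
      have hpnf : pB r i0 = false ∧ nB r i0 = false := by
        unfold bB at hbad0
        rw [Bool.and_eq_true, Bool.not_eq_true', Bool.not_eq_true'] at hbad0
        exact hbad0
      have hthd : ((PySem.List.pyRange 0 ((r.length : Int) - 1) 1).foldl (altStep r)
          ((0 : Int), (0 : Int), (-1 : Int))).2.2 = i0 := by
        have hsplit : PySem.List.pyRange 0 ((r.length : Int) - 1) 1
            = PySem.List.pyRange 0 i0 1 ++ i0 :: PySem.List.pyRange (i0 + 1) ((r.length : Int) - 1) 1 := by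
          rw [PySem.List.pyRange_one_append 0 i0 ((r.length : Int) - 1) hi00 (le_of_lt hi0m),
            PySem.List.pyRange_one_cons hi0m]
        rw [hsplit]
        apply fold_thd r _ _ _ _ hbad0
        intro k hk
        obtain ⟨a, b⟩ := PySem.List.mem_pyRange_one.mp hk
        cases hbk : bB r k with
        | false => rfl
        | true =>
          exfalso
          have := huniq k (by omega) b hbk
          omega
      have ht : i0.toNat < r.length := by omega
      have hp1 : PySem.List.pop? r i0 = some (r[i0.toNat]'(by omega), r.eraseIdx i0.toNat) := by
        have h2 := PySem.List.pop?_natCast r i0.toNat (by omega : i0.toNat < r.length)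
        rwa [show ((i0.toNat : Nat) : Int) = i0 by omega] at h2
      have hp2 : PySem.List.pop? r (i0 + 1)
          = some (r[i0.toNat + 1]'(by omega), r.eraseIdx (i0.toNat + 1)) := by
        have h2 := PySem.List.pop?_natCast r (i0.toNat + 1) (by omega : i0.toNat + 1 < r.length)
        rwa [show ((i0.toNat + 1 : Nat) : Int) = i0 + 1 by omega] at h2
      simp only [List.map_cons, List.map_nil, List.length_cons, List.length_nil, List.head?_cons,
        if_pos, hp1, hp2]
      rw [fold_fst0, fold_snd0, hthd]
      rw [if_neg (by omega : ¬ ((↑((PySem.List.pyRange 0 ((r.length : Int) - 1) 1).countP (pB r)) : Int) + ↑((PySem.List.pyRange 0 ((r.length : Int) - 1) 1).countP (nB r)) ≠ (r.length : Int) - 1 - 1))]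
      rw [if_true_else]
      congr 1
      · -- removing report[i0]
        by_cases h0 : i0 = 0
        · subst h0
          rw [if_pos rfl, Bool.eq_iff_iff, strict_iff]
          simp only [decide_eq_true_eq]
          rw [erase_iff_up r 0 le_rfl (by omega), erase_iff_down r 0 le_rfl (by omega)]
          have honeP := countP_one_gap ((r.length : Int) - 1) 0 (pB r) le_rfl (by omega)
          have honeN := countP_one_gap ((r.length : Int) - 1) 0 (nB r) le_rfl (by omega)
          rw [hpnf.1] at honeP
          rw [hpnf.2] at honeN
          norm_num at honeP honeN
          constructor
          · rintro (⟨ho, _⟩ | ⟨ho, _⟩)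
            · left
              exact honeP.mpr (fun k a b c => by
                unfold pB
                exact decide_eq_true (ho k a b (by omega) c))
            · right
              exact honeN.mpr (fun k a b c => by
                unfold nB
                exact decide_eq_true (ho k a b (by omega) c))
          · rintro (hc | hc)
            · left
              refine ⟨fun k a b _ c => ?_, fun h1 _ => absurd h1 (by omega)⟩
              have := honeP.mp hc k a b c
              unfold pB at this
              simpa using this
            · right
              refine ⟨fun k a b _ c => ?_, fun h1 _ => absurd h1 (by omega)⟩
              have := honeN.mp hc k a b c
              unfold nB at this
              simpa using this
        · rw [if_neg h0, Bool.eq_iff_iff, strict_iff]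
          simp only [decide_eq_true_eq]
          rw [erase_iff_up r i0 hi00 (by omega), erase_iff_down r i0 hi00 (by omega)]
          have hi01 : 1 ≤ i0 := by omega
          have hagd : gd r (i0 - 1)
              = PySem.List.pyGetD r i0 0 - PySem.List.pyGetD r (i0 - 1) 0 := by
            unfold gd
            rw [show i0 - 1 + 1 = i0 by ring]
          have hsring : PySem.List.pyGetD r i0 0 - PySem.List.pyGetD r (i0 - 1) 0 +
                (PySem.List.pyGetD r (i0 + 1) 0 - PySem.List.pyGetD r i0 0)
              = PySem.List.pyGetD r (i0 + 1) 0 - PySem.List.pyGetD r (i0 - 1) 0 := by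
            ring
          rw [hsring]
          have htwoP := countP_two_gap ((r.length : Int) - 1) (i0 - 1) (pB r) (by omega) (by omega)
          have htwoN := countP_two_gap ((r.length : Int) - 1) (i0 - 1) (nB r) (by omega) (by omega)
          rw [show i0 - 1 + 1 = i0 by ring] at htwoP htwoN
          rw [hpnf.1] at htwoP
          rw [hpnf.2] at htwoN
          norm_num at htwoP htwoN
          have hiteP : (if 1 ≤ PySem.List.pyGetD r i0 0 - PySem.List.pyGetD r (i0 - 1) 0 ∧
                PySem.List.pyGetD r i0 0 - PySem.List.pyGetD r (i0 - 1) 0 ≤ 3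
              then (1:Int) else 0) = (if pB r (i0 - 1) then 1 else 0) := by
            unfold pB
            rw [hagd]
            by_cases h : 1 ≤ PySem.List.pyGetD r i0 0 - PySem.List.pyGetD r (i0 - 1) 0 ∧
                PySem.List.pyGetD r i0 0 - PySem.List.pyGetD r (i0 - 1) 0 ≤ 3 <;> simp [h]
          have hiteN : (if -3 ≤ PySem.List.pyGetD r i0 0 - PySem.List.pyGetD r (i0 - 1) 0 ∧
                PySem.List.pyGetD r i0 0 - PySem.List.pyGetD r (i0 - 1) 0 ≤ -1
              then (1:Int) else 0) = (if nB r (i0 - 1) then 1 else 0) := by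
            unfold nB
            rw [hagd]
            by_cases h : -3 ≤ PySem.List.pyGetD r i0 0 - PySem.List.pyGetD r (i0 - 1) 0 ∧
                PySem.List.pyGetD r i0 0 - PySem.List.pyGetD r (i0 - 1) 0 ≤ -1 <;> simp [h]
          rw [hiteP, hiteN]
          constructor
          · rintro (⟨ho, hm⟩ | ⟨ho, hm⟩)
            · left
              have hmv := hm hi01 (by omega)
              refine ⟨hmv.1, hmv.2, ?_⟩
              have := htwoP.mpr (fun k a b c d => by
                unfold pB
                exact decide_eq_true (ho k a b c d))
              omega
            · right
              have hmv := hm hi01 (by omega)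
              refine ⟨hmv.1, hmv.2, ?_⟩
              have := htwoN.mpr (fun k a b c d => by
                unfold nB
                exact decide_eq_true (ho k a b c d))
              omega
          · rintro (⟨h1, h2, h3⟩ | ⟨h1, h2, h3⟩)
            · left
              refine ⟨fun k a b c d => ?_, fun _ _ => ⟨h1, h2⟩⟩
              have := htwoP.mp (by omega) k a b c d
              unfold pB at this
              simpa using this
            · right
              refine ⟨fun k a b c d => ?_, fun _ _ => ⟨h1, h2⟩⟩
              have := htwoN.mp (by omega) k a b c d
              unfold nB at this
              simpa using this
      · -- removing report[i0 + 1]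
        have hup := erase_iff_up r (i0 + 1) (by omega) (by omega)
        have hdn := erase_iff_down r (i0 + 1) (by omega) (by omega)
        rw [show (i0 + 1).toNat = i0.toNat + 1 by omega] at hup hdn
        rw [show i0 + 1 - 1 = i0 by ring] at hup hdn
        rw [show i0 + 1 + 1 = i0 + 2 by ring] at hup hdn
        by_cases hEnd : i0 = (r.length : Int) - 1 - 1
        · rw [if_pos hEnd, Bool.eq_iff_iff, strict_iff]
          simp only [decide_eq_true_eq]
          rw [hup, hdn]
          have honeP := countP_one_gap ((r.length : Int) - 1) i0 (pB r) hi00 (by omega)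
          have honeN := countP_one_gap ((r.length : Int) - 1) i0 (nB r) hi00 (by omega)
          rw [hpnf.1] at honeP
          rw [hpnf.2] at honeN
          norm_num at honeP honeN
          constructor
          · rintro (⟨ho, _⟩ | ⟨ho, _⟩)
            · left
              exact honeP.mpr (fun k a b c => by
                unfold pB
                exact decide_eq_true (ho k a b c (by omega)))
            · right
              exact honeN.mpr (fun k a b c => by
                unfold nB
                exact decide_eq_true (ho k a b c (by omega)))
          · rintro (hc | hc)
            · left
              refine ⟨fun k a b c _ => ?_, fun _ h2 => absurd h2 (by omega)⟩
              have := honeP.mp hc k a b c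
              unfold pB at this
              simpa using this
            · right
              refine ⟨fun k a b c _ => ?_, fun _ h2 => absurd h2 (by omega)⟩
              have := honeN.mp hc k a b c
              unfold nB at this
              simpa using this
        · rw [if_neg hEnd, Bool.eq_iff_iff, strict_iff]
          simp only [decide_eq_true_eq]
          rw [hup, hdn]
          have hcgd : gd r (i0 + 1)
              = PySem.List.pyGetD r (i0 + 2) 0 - PySem.List.pyGetD r (i0 + 1) 0 := by
            unfold gd
            rw [show i0 + 1 + 1 = i0 + 2 by ring]
          have hsring : PySem.List.pyGetD r (i0 + 1) 0 - PySem.List.pyGetD r i0 0 +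
                (PySem.List.pyGetD r (i0 + 2) 0 - PySem.List.pyGetD r (i0 + 1) 0)
              = PySem.List.pyGetD r (i0 + 2) 0 - PySem.List.pyGetD r i0 0 := by
            ring
          rw [hsring]
          have htwoP := countP_two_gap ((r.length : Int) - 1) i0 (pB r) hi00 (by omega)
          have htwoN := countP_two_gap ((r.length : Int) - 1) i0 (nB r) hi00 (by omega)
          rw [hpnf.1] at htwoP
          rw [hpnf.2] at htwoN
          norm_num at htwoP htwoN
          have hiteP : (if 1 ≤ PySem.List.pyGetD r (i0 + 2) 0 - PySem.List.pyGetD r (i0 + 1) 0 ∧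
                PySem.List.pyGetD r (i0 + 2) 0 - PySem.List.pyGetD r (i0 + 1) 0 ≤ 3
              then (1:Int) else 0) = (if pB r (i0 + 1) then 1 else 0) := by
            unfold pB
            rw [hcgd]
            by_cases h : 1 ≤ PySem.List.pyGetD r (i0 + 2) 0 - PySem.List.pyGetD r (i0 + 1) 0 ∧
                PySem.List.pyGetD r (i0 + 2) 0 - PySem.List.pyGetD r (i0 + 1) 0 ≤ 3 <;> simp [h]
          have hiteN : (if -3 ≤ PySem.List.pyGetD r (i0 + 2) 0 - PySem.List.pyGetD r (i0 + 1) 0 ∧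
                PySem.List.pyGetD r (i0 + 2) 0 - PySem.List.pyGetD r (i0 + 1) 0 ≤ -1
              then (1:Int) else 0) = (if nB r (i0 + 1) then 1 else 0) := by
            unfold nB
            rw [hcgd]
            by_cases h : -3 ≤ PySem.List.pyGetD r (i0 + 2) 0 - PySem.List.pyGetD r (i0 + 1) 0 ∧
                PySem.List.pyGetD r (i0 + 2) 0 - PySem.List.pyGetD r (i0 + 1) 0 ≤ -1 <;> simp [h]
          rw [hiteP, hiteN]
          constructor
          · rintro (⟨ho, hm⟩ | ⟨ho, hm⟩)
            · left
              have hmv := hm (by omega) (by omega)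
              refine ⟨hmv.1, hmv.2, ?_⟩
              have := htwoP.mpr (fun k a b c d => by
                unfold pB
                exact decide_eq_true (ho k a b c d))
              omega
            · right
              have hmv := hm (by omega) (by omega)
              refine ⟨hmv.1, hmv.2, ?_⟩
              have := htwoN.mpr (fun k a b c d => by
                unfold nB
                exact decide_eq_true (ho k a b c d))
              omega
          · rintro (⟨h1, h2, h3⟩ | ⟨h1, h2, h3⟩)
            · left
              refine ⟨fun k a b c d => ?_, fun _ _ => ⟨h1, h2⟩⟩
              have := htwoP.mp (by omega) k a b c d
              unfold pB at this
              simpa using this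
            · right
              refine ⟨fun k a b c d => ?_, fun _ _ => ⟨h1, h2⟩⟩
              have := htwoN.mp (by omega) k a b c d
              unfold nB at this
              simpa using this

-- ===== VERDICT (by name: the statement is the Claim_ definition above) =====
theorem check_almost_safe_differences_spec : Claim_equal_check_almost_safe_differences := by
  intro report _
  unfold Spec_check_almost_safe_differences
  exact main_eq report
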